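-- pv_equiv track=rewrite | github.com/sp9028/P1 | Rešitve starih izpitov/16.8.py | deli
-- ===== SOURCE A (Python) =====
-- def deli(paketi, kapacitete):
--     ladje = [] + len(kapacitete) * [0]
--     for paket in paketi:
--         ladja_st = 0
--         for ladja in ladje:
--             if ladja == min(ladje) and ladja + paket <= kapacitete[ladja_st]:
--                 ladje[ladja_st] += paket
--                 break
--             ladja_st += 1
--         else:
--             ladja_st = 0
--             for ladja in ladje:
--                 if ladja + paket <= kapacitete[ladja_st]:
--                     ladje[ladja_st] += paket
--                     break
--                 ladja_st += 1
--     return ladje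
-- ===== SOURCE B (Python) =====
-- def deli(paketi, kapacitete):
--     ladje = [0] * len(kapacitete)
--     for paket in paketi:
--         m = min(ladje) if ladje else None
--         first_fit = None
--         min_fit = None
--         for i, (l, k) in enumerate(zip(ladje, kapacitete)):
--             if l + paket <= k:
--                 if first_fit is None:
--                     first_fit = i
--                 if l == m:
--                     min_fit = i
--                     break
--         target = min_fit if min_fit is not None else first_fit
--         if target is not None:
--             ladje[target] += paket
--     return ladje
-- ===== Notes on version B (the rewrite author's own statement) =====
-- stated objective: simpler
-- what changed: Replaces A's two sequential inner scans (min-load-first-fit loop with min(ladje) recomputed every iteration, then a for-else first-fit loop) by one single pass over zip(ladje, kapacitete) that records the first-fit and min-fit indices at once, with min computed once per package.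
import Mathlib
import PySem

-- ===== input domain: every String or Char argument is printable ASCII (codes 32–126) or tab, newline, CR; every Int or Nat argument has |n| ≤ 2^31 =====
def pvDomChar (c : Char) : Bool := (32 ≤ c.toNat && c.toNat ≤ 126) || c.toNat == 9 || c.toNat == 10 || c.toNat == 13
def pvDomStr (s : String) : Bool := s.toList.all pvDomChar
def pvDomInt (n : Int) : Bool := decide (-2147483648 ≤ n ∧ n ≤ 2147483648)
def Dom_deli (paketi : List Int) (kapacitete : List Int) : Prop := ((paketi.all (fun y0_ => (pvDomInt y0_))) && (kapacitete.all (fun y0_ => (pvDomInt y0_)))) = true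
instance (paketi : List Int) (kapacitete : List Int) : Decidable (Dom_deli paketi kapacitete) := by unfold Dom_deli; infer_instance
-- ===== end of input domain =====

-- B merges A's two sequential scans (min-load-first fit, then plain first fit) into one
-- single pass that records both candidate indices at once; objective: simpler (and A's
-- per-iteration min() recomputation disappears).

-- ===== PORT A =====
-- min(ladje) for nonempty ladje (A only calls min on a nonempty list; [] case unreachable)
def pymin : List Int → Int
  | [] => 0
  | x :: xs => xs.foldl min x

-- A's first inner loop: first index i (counter starting at i0) with ladje[i] == min(full) and fit;
-- `full` is the whole (unchanged) list so min(ladje) is recomputed literally at each step.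
def scanA1 (full kap : List Int) (paket : Int) : List Int → Nat → Option Nat
  | [], _ => none
  | l :: rest, i =>
    if l = pymin full ∧ l + paket ≤ kap.getD i 0 then some i
    else scanA1 full kap paket rest (i + 1)

-- A's second inner loop (the for-else branch): first index that fits.
def scanA2 (kap : List Int) (paket : Int) : List Int → Nat → Option Nat
  | [], _ => none
  | l :: rest, i =>
    if l + paket ≤ kap.getD i 0 then some i
    else scanA2 kap paket rest (i + 1)

-- ladje[i] += paket
def addAt (ladje : List Int) (i : Nat) (paket : Int) : List Int :=
  ladje.set i (ladje.getD i 0 + paket)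

def stepA (kap : List Int) (ladje : List Int) (paket : Int) : List Int :=
  match scanA1 ladje kap paket ladje 0 with
  | some i => addAt ladje i paket
  | none =>
    match scanA2 kap paket ladje 0 with
    | some i => addAt ladje i paket
    | none => ladje

def deli (paketi : List Int) (kapacitete : List Int) : List Int :=
  paketi.foldl (stepA kapacitete) ([] ++ List.replicate kapacitete.length 0)

-- ===== PORT B =====
-- B's single pass over zip(ladje, kapacitete): returns (first_fit, min_fit), breaking
-- as soon as a fitting ship with minimal load is found.
def scanB (m paket : Int) : List (Int × Int) → Nat → Option Nat × Option Nat
  | [], _ => (none, none)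
  | (l, k) :: rest, i =>
    if l + paket ≤ k then
      if l = m then (some i, some i)
      else
        let r := scanB m paket rest (i + 1)
        (some i, r.2)
    else scanB m paket rest (i + 1)

def stepB (kap : List Int) (ladje : List Int) (paket : Int) : List Int :=
  let m := pymin ladje
  let r := scanB m paket (ladje.zip kap) 0
  match r.2 with
  | some i => addAt ladje i paket
  | none =>
    match r.1 with
    | some i => addAt ladje i paket
    | none => ladje

def deli_alt (paketi : List Int) (kapacitete : List Int) : List Int :=
  paketi.foldl (stepB kapacitete) (List.replicate kapacitete.length 0)

-- ===== PRECONDITION & SPEC =====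
def Spec_deli (paketi : List Int) (kapacitete : List Int) (out : List Int) : Prop := out = deli_alt paketi kapacitete
instance (paketi : List Int) (kapacitete : List Int) (out : List Int) : Decidable (Spec_deli paketi kapacitete out) := by unfold Spec_deli; infer_instance

-- ===== CLAIM (what is proved, stated in full; the proofs are below) =====
def Claim_equal_deli : Prop := ∀ (paketi : List Int) (kapacitete : List Int), Dom_deli paketi kapacitete → Spec_deli paketi kapacitete (deli paketi kapacitete)

-- ===== LEMMAS AND PROOFS =====

-- A's min-condition scan only depends on the value min(full): same scan with condition l = m.
-- the single pass computes exactly (A's second scan, A's first scan)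
lemma scan_pair (full kap : List Int) (paket : Int) :
    ∀ (lrest krest : List Int) (i : Nat),
      kap.drop i = krest → lrest.length ≤ krest.length →
      scanB (pymin full) paket (lrest.zip krest) i =
        (scanA2 kap paket lrest i, scanA1 full kap paket lrest i) := by
  intro lrest
  induction lrest with
  | nil => intro krest i _ _; simp [scanB, scanA1, scanA2]
  | cons l rest ih =>
    intro krest i hdrop hlen
    cases krest with
    | nil => simp at hlen
    | cons k ks =>
      have hk : kap.getD i 0 = k := by
        have : kap.getD i 0 = (kap.drop i).getD 0 0 := by
          simp [List.getD_eq_getElem?_getD, List.getElem?_drop]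
        rw [this, hdrop]; rfl
      have hdrop' : kap.drop (i + 1) = ks := by
        have : kap.drop (i + 1) = (kap.drop i).drop 1 := by
          rw [List.drop_drop]
        rw [this, hdrop]; rfl
      have hlen' : rest.length ≤ ks.length := by simpa using hlen
      have ihr := ih ks (i + 1) hdrop' hlen'
      simp only [List.zip_cons_cons, scanB, scanA1, scanA2, hk]
      by_cases hfit : l + paket ≤ k
      · by_cases hm : l = pymin full
        · subst hm; simp [hfit]
        · simp [hfit, hm, ihr]
      · simp [hfit, ihr]

lemma step_eq (kap ladje : List Int) (paket : Int) (hlen : ladje.length = kap.length) :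
    stepA kap ladje paket = stepB kap ladje paket := by
  have h := scan_pair ladje kap paket ladje kap 0 (by simp) (by omega)
  simp only [stepA, stepB]
  rw [h]

lemma addAt_length (ladje : List Int) (i : Nat) (paket : Int) :
    (addAt ladje i paket).length = ladje.length := by
  simp [addAt]

lemma stepA_length (kap ladje : List Int) (paket : Int) :
    (stepA kap ladje paket).length = ladje.length := by
  unfold stepA
  cases scanA1 ladje kap paket ladje 0 with
  | some i => simp [addAt_length]
  | none =>
    cases scanA2 kap paket ladje 0 with
    | some i => simp [addAt_length]
    | none => rfl

lemma foldl_eq (kap : List Int) :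
    ∀ (paketi : List Int) (ladje : List Int), ladje.length = kap.length →
      paketi.foldl (stepA kap) ladje = paketi.foldl (stepB kap) ladje := by
  intro paketi
  induction paketi with
  | nil => intro _ _; rfl
  | cons p ps ih =>
    intro ladje hlen
    simp only [List.foldl_cons]
    rw [step_eq kap ladje p hlen, ← step_eq kap ladje p hlen]
    exact ih _ (by rw [stepA_length]; exact hlen)

-- ===== VERDICT (by name: the statement is the Claim_ definition above) =====
theorem deli_spec : Claim_equal_deli := by
  intro paketi kapacitete _
  unfold Spec_deli deli deli_alt
  simp only [List.nil_append]
  exact foldl_eq kapacitete paketi _ (by simp)
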